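-- pv_equiv track=rewrite | github.com/violet-luo/leetcode | 5_hash_map/Karat. Common Course.py | courseOverlaps
-- ===== SOURCE A (Python) =====
-- def courseOverlaps(enrollment):
--     courses = {}
--     res = {}
--
--     for student_id, course in enrollment:
--         if student_id in courses:
--             courses[student_id].append(course)
--         else:
--             courses[student_id] = [course]
--
--     student_id = list(courses.keys())
--     for i in range(len(student_id)):
--         for j in range(i + 1, len(student_id)):
--             overlaps = []
--             for course1 in courses[student_id[i]]:
--                 for course2 in courses[student_id[j]]:
--                     if course1 == course2:
--                         overlaps.append(course1)
--             students = (student_id[i], student_id[j])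
--             res[students] = overlaps
--     return res
-- ===== SOURCE B (Python) =====
-- def courseOverlaps(enrollment):
--     order = []
--     by = {}
--     for sid, c in enrollment:
--         if sid not in by:
--             order.append(sid)
--         by[sid] = by.get(sid, []) + [c]
--     res = {}
--     rest = order
--     while rest:
--         s1, rest = rest[0], rest[1:]
--         cs1 = by[s1]
--         for s2 in rest:
--             cnt = {}
--             for c in by[s2]:
--                 cnt[c] = cnt.get(c, 0) + 1
--             res[(s1, s2)] = [c for c in cs1 for _ in range(cnt.get(c, 0))]
--     return res
-- ===== Notes on version B (the rewrite author's own statement) =====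
-- stated objective: alternative
-- what changed: B groups in one pass keeping an explicit order list, then walks student pairs by recursively peeling the first student off the remaining list and, per pair, builds a count dict of the second student's courses once and produces the overlap as a single comprehension emitting count-many copies per course of the first student, replacing A's index-range double loop with a nested scan of both course lists per pair.
import Mathlib
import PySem

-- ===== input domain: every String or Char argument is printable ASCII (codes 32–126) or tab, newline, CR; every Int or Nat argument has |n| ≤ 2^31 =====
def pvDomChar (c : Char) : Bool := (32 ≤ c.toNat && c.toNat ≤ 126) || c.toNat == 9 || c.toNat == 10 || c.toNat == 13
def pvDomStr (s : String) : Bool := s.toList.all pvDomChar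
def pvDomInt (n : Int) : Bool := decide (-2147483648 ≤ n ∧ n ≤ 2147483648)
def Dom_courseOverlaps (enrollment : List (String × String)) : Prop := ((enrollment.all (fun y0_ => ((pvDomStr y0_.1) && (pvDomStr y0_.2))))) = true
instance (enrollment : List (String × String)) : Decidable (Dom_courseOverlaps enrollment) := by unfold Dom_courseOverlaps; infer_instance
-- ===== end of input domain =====

-- B replaces A's per-pair nested scan by a per-pair count dict plus a flat comprehension, and walks
-- student pairs by recursively peeling the head off the remaining-ids list; objective: alternative
-- (a genuinely different pair/overlap computation, not measured faster).


-- ===== PORT A =====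
def courseOverlaps (enrollment : List (String × String)) : List (String × String × List String) :=
  let courses : PySem.Dict String (List String) :=
    enrollment.foldl (fun d p =>
      if d.contains p.1 then d.modify p.1 [] (fun l => l ++ [p.2])
      else d.insert p.1 [p.2]) PySem.Dict.empty
  let student_id := courses.keys
  let res : PySem.Dict (String × String) (List String) :=
    (PySem.List.pyRange 0 student_id.length).foldl (fun res i =>
      (PySem.List.pyRange (i + 1) student_id.length).foldl (fun res j =>
        let overlaps :=
          (courses.getD (PySem.List.pyGetD student_id i "") []).foldl (fun ov c1 =>
            (courses.getD (PySem.List.pyGetD student_id j "") []).foldl (fun ov c2 =>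
              if c1 == c2 then ov ++ [c1] else ov) ov) []
        res.insert (PySem.List.pyGetD student_id i "", PySem.List.pyGetD student_id j "") overlaps)
        res) PySem.Dict.empty
  res.items.map (fun p => (p.1.1, p.1.2, p.2))

-- ===== PORT B =====
-- grouping pass: state is (order, by); 'by[sid] = by.get(sid, []) + [c]' is insert of getD ++ [c]
def pvGroupB (enrollment : List (String × String)) :
    List String × PySem.Dict String (List String) :=
  enrollment.foldl (fun st p =>
    ((if st.2.contains p.1 then st.1 else st.1 ++ [p.1]),
     st.2.insert p.1 (st.2.getD p.1 [] ++ [p.2]))) ([], PySem.Dict.empty)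

-- the while loop: peel s1 off rest, emit a pair entry for every s2 still in rest
-- '[c for c in cs1 for _ in range(cnt.get(c, 0))]' is flatMap of replicate (counts are ≥ 0, so
-- range(n) yields exactly n copies)
def pvPairsB (byD : PySem.Dict String (List String)) :
    List String → PySem.Dict (String × String) (List String) →
    PySem.Dict (String × String) (List String)
  | [], res => res
  | s1 :: rest, res =>
      let cs1 := byD.getD s1 []
      pvPairsB byD rest (rest.foldl (fun res s2 =>
        let cnt : PySem.Dict String Int :=
          (byD.getD s2 []).foldl (fun d c => d.insert c (d.getD c 0 + 1)) PySem.Dict.empty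
        res.insert (s1, s2) (cs1.flatMap (fun c => List.replicate (cnt.getD c 0).toNat c))) res)

def courseOverlaps_alt (enrollment : List (String × String)) : List (String × String × List String) :=
  let g := pvGroupB enrollment
  (pvPairsB g.2 g.1 PySem.Dict.empty).items.map (fun p => (p.1.1, p.1.2, p.2))

-- ===== PRECONDITION & SPEC =====
def Spec_courseOverlaps (enrollment : List (String × String)) (out : List (String × String × List String)) : Prop := out = courseOverlaps_alt enrollment
instance (enrollment : List (String × String)) (out : List (String × String × List String)) : Decidable (Spec_courseOverlaps enrollment out) := by unfold Spec_courseOverlaps; infer_instance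

-- ===== CLAIM (what is proved, stated in full; the proofs are below) =====
def Claim_equal_courseOverlaps : Prop := ∀ (enrollment : List (String × String)), Dom_courseOverlaps enrollment → Spec_courseOverlaps enrollment (courseOverlaps enrollment)

-- ===== LEMMAS AND PROOFS =====

-- canonical "all ordered pairs" fold both pair loops are shown equal to
def pairsFold {γ : Type} (F : γ → String → String → γ) : List String → γ → γ
  | [], r => r
  | x :: xs, r => pairsFold F xs (xs.foldl (fun r y => F r x y) r)

-- B's grouping pass computes A's courses dict together with its key list
theorem groupB_aux (e : List (String × String)) :
    ∀ d : PySem.Dict String (List String),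
      e.foldl (fun st p =>
          ((if st.2.contains p.1 then st.1 else st.1 ++ [p.1]),
           st.2.insert p.1 (st.2.getD p.1 [] ++ [p.2]))) (d.keys, d)
        = ((e.foldl (fun d p =>
              if d.contains p.1 then d.modify p.1 [] (fun l => l ++ [p.2])
              else d.insert p.1 [p.2]) d).keys,
           e.foldl (fun d p =>
              if d.contains p.1 then d.modify p.1 [] (fun l => l ++ [p.2])
              else d.insert p.1 [p.2]) d) := by
  induction e with
  | nil => intro d; rfl
  | cons p e ih =>
    intro d
    simp only [List.foldl_cons]
    by_cases h : d.contains p.1 = true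
    · have hstep : ((if d.contains p.1 then d.keys else d.keys ++ [p.1]),
          d.insert p.1 (d.getD p.1 [] ++ [p.2]))
          = ((d.modify p.1 [] (fun l => l ++ [p.2])).keys,
             d.modify p.1 [] (fun l => l ++ [p.2])) := by
        rw [if_pos h]
        exact congrArg (fun k => (k, d.insert p.1 (d.getD p.1 [] ++ [p.2])))
          (PySem.Dict.keys_insert_of_contains d _ h).symm
      rw [hstep, ih, if_pos h]
    · simp only [Bool.not_eq_true] at h
      have hstep : ((if d.contains p.1 then d.keys else d.keys ++ [p.1]),
          d.insert p.1 (d.getD p.1 [] ++ [p.2]))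
          = ((d.insert p.1 [p.2]).keys, d.insert p.1 [p.2]) := by
        rw [h, PySem.Dict.getD_of_not_contains d [] h,
          PySem.Dict.keys_insert_of_not_contains d [p.2] h]
        rfl
      rw [hstep, ih, h]
      simp only [if_neg Bool.false_ne_true]

theorem groupB_eq (e : List (String × String)) :
    pvGroupB e
      = ((e.foldl (fun d p =>
            if d.contains p.1 then d.modify p.1 [] (fun l => l ++ [p.2])
            else d.insert p.1 [p.2]) PySem.Dict.empty).keys,
         e.foldl (fun d p =>
            if d.contains p.1 then d.modify p.1 [] (fun l => l ++ [p.2])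
            else d.insert p.1 [p.2]) PySem.Dict.empty) :=
  groupB_aux e PySem.Dict.empty

-- B's pair recursion is the canonical pairsFold of its per-pair step
theorem pairsB_eq_pairsFold (byD : PySem.Dict String (List String)) :
    ∀ (l : List String) (res : PySem.Dict (String × String) (List String)),
      pvPairsB byD l res
        = pairsFold (fun r s1 s2 => r.insert (s1, s2)
            ((byD.getD s1 []).flatMap (fun c => List.replicate
              (((byD.getD s2 []).foldl (fun (d : PySem.Dict String Int) c => d.insert c (d.getD c 0 + 1))
                PySem.Dict.empty).getD c 0).toNat c))) l res := by
  intro l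
  induction l with
  | nil => intro res; rfl
  | cons s1 rest ih => intro res; rw [pvPairsB, pairsFold, ih]

-- A's inner 'for c2 in ys: if c1 == c2: append c1' appends count ys c1 copies of c1
theorem inner_count (c1 : String) (ys : List String) :
    ∀ ov : List String,
      ys.foldl (fun ov c2 => if c1 == c2 then ov ++ [c1] else ov) ov
        = ov ++ List.replicate (ys.count c1) c1 := by
  induction ys with
  | nil => intro ov; simp
  | cons y ys ih =>
    intro ov
    rw [List.foldl_cons]
    by_cases h : c1 = y
    · subst h
      rw [if_pos (by simp), ih, List.count_cons_self]
      simp [List.replicate_succ, List.append_assoc]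
    · rw [if_neg (by simp [h]), ih, List.count_cons_of_ne (Ne.symm h)]

-- A's double scan equals B's count-dict comprehension, for any two course lists
theorem overlap_eq (xs ys : List String) :
    xs.foldl (fun ov c1 =>
        ys.foldl (fun ov c2 => if c1 == c2 then ov ++ [c1] else ov) ov) ([] : List String)
    = xs.flatMap (fun c => List.replicate
        (((ys.foldl (fun (d : PySem.Dict String Int) c => d.insert c (d.getD c 0 + 1))
          PySem.Dict.empty).getD c 0)).toNat c) := by
  rw [PySem.Dict.foldl_insert_getD_add_one_eq_counter]
  have h := PySem.List.foldl_append_eq_flatMap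
    (fun c => List.replicate (((PySem.Dict.counter ys).getD c 0)).toNat c) xs ([] : List String)
  rw [List.nil_append] at h
  rw [← h]
  apply PySem.List.foldl_congr_mem
  intro ov c _
  rw [inner_count, PySem.Dict.getD_counter, Int.toNat_natCast]

-- index loop over a range tail = element loop over the corresponding suffix
theorem range_fold {γ : Type} (ids : List String) (G : γ → String → γ) :
    ∀ (m a : Nat), ids.length - a = m → ∀ r : γ,
      (PySem.List.pyRange (a : Int) ids.length).foldl
          (fun r j => G r (PySem.List.pyGetD ids j "")) r
        = (ids.drop a).foldl G r := by
  intro m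
  induction m with
  | zero =>
    intro a ha r
    rw [PySem.List.pyRange_one_eq_nil (by omega), List.drop_eq_nil_of_le (by omega)]
    rfl
  | succ m ih =>
    intro a ha r
    have hlt : a < ids.length := by omega
    rw [PySem.List.pyRange_one_cons (by exact_mod_cast hlt), List.drop_eq_getElem_cons hlt]
    simp only [List.foldl_cons, PySem.List.pyGetD_natCast]
    have : ((a : Int) + 1) = ((a + 1 : Nat) : Int) := by push_cast; ring
    rw [this, ih (a + 1) (by omega), List.getD_eq_getElem ids "" hlt]

-- A's nested index loops equal pairsFold over the suffix
theorem range_pairs {γ : Type} (ids : List String) (F : γ → String → String → γ) :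
    ∀ (m k : Nat), ids.length - k = m → ∀ r : γ,
      (PySem.List.pyRange (k : Int) ids.length).foldl
          (fun r i => (PySem.List.pyRange (i + 1) ids.length).foldl
            (fun r j => F r (PySem.List.pyGetD ids i "") (PySem.List.pyGetD ids j "")) r) r
        = pairsFold F (ids.drop k) r := by
  intro m
  induction m with
  | zero =>
    intro k hk r
    rw [PySem.List.pyRange_one_eq_nil (by omega), List.drop_eq_nil_of_le (by omega)]
    rfl
  | succ m ih =>
    intro k hk r
    have hlt : k < ids.length := by omega
    rw [PySem.List.pyRange_one_cons (by exact_mod_cast hlt), List.drop_eq_getElem_cons hlt]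
    simp only [List.foldl_cons, pairsFold]
    have hc : ((k : Int) + 1) = ((k + 1 : Nat) : Int) := by push_cast; ring
    rw [hc, ih (k + 1) (by omega)]
    congr 1
    rw [range_fold ids _ (ids.length - (k + 1)) (k + 1) rfl r]
    simp [PySem.List.pyGetD_natCast, List.getElem?_eq_getElem hlt]

-- ===== VERDICT (by name: the statement is the Claim_ definition above) =====
theorem courseOverlaps_spec : Claim_equal_courseOverlaps := by
  intro e _
  show courseOverlaps e = courseOverlaps_alt e
  simp only [courseOverlaps, courseOverlaps_alt, groupB_eq]
  generalize (e.foldl (fun d p =>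
      if d.contains p.1 then d.modify p.1 [] (fun l => l ++ [p.2])
      else d.insert p.1 [p.2]) PySem.Dict.empty : PySem.Dict String (List String)) = C
  congr 2
  have hA := range_pairs (γ := PySem.Dict (String × String) (List String)) C.keys
    (fun r s1 s2 => r.insert (s1, s2)
      ((C.getD s1 []).foldl (fun ov c1 =>
        (C.getD s2 []).foldl (fun ov c2 => if c1 == c2 then ov ++ [c1] else ov) ov) []))
    C.keys.length 0 (by omega) PySem.Dict.empty
  simp only [Nat.cast_zero] at hA
  rw [hA, List.drop_zero, pairsB_eq_pairsFold]
  have hF : (fun (r : PySem.Dict (String × String) (List String)) s1 s2 => r.insert (s1, s2)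
      ((C.getD s1 []).foldl (fun ov c1 =>
        (C.getD s2 []).foldl (fun ov c2 => if c1 == c2 then ov ++ [c1] else ov) ov) []))
      = (fun r s1 s2 => r.insert (s1, s2)
      ((C.getD s1 []).flatMap (fun c => List.replicate
        (((C.getD s2 []).foldl (fun (d : PySem.Dict String Int) c => d.insert c (d.getD c 0 + 1))
          PySem.Dict.empty).getD c 0).toNat c))) := by
    funext r s1 s2
    rw [overlap_eq]
  rw [hF]
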